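-- pv_equiv track=rewrite | github.com/Splavacodo/Algo-DS | General/knapsackExists.py | knapsackExists
-- ===== SOURCE A (Python) =====
-- def knapsackExists(A, M):
--     f = [[0 for _ in range(M + 1)] for _ in range(len(A) + 1)]
--
--     for i in range(len(f)):
--         f[i][0] = 1
--
--     for i in range(1, len(A) + 1):
--         for k in range(1, M + 1):
--             if k < A[i-1]:
--                 f[i][k] = f[i - 1][k]
--             else:
--                 f[i][k] = max(f[i-1][k], f[i][k - A[i - 1]])
--
--     return f[len(A)][M]
-- ===== SOURCE B (Python) =====
-- def knapsackExists(A, M):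
--     reach = [False] * (M + 1)
--     reach[0] = True
--     for s in range(1, M + 1):
--         reach[s] = any([c <= s and reach[s - c] for c in A])
--     return 1 if reach[M] else 0
-- ===== Notes on version B (the rewrite author's own statement) =====
-- stated objective: alternative
-- what changed: Replaces the (len(A)+1)x(M+1) item-major DP table by a sum-major single pass over one 1-D boolean reach array: reach[s] is set when some coin c <= s lands on an already reachable s-c; same O(n*M) work, O(M) space instead of O(n*M).
import Mathlib
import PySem

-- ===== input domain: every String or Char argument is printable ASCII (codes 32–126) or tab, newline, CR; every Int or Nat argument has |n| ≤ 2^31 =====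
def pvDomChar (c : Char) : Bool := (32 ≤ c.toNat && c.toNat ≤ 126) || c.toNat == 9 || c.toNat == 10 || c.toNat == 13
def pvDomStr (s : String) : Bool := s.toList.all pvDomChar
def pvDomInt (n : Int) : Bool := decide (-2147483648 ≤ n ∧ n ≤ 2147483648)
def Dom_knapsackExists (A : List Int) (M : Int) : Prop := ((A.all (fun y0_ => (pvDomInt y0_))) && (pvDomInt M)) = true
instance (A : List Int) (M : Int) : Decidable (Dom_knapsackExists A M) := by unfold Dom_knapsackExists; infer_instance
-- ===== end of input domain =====

-- B replaces A's 2-D item-major DP table by a sum-major single pass over a 1-D boolean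
-- reach array (objective: alternative, same O(n*M) work, O(M) space).

-- ===== PORT A =====
-- f[i][k] and f[i][k] = v on the list-of-lists table (total forms; the out-of-range
-- accesses on which Python raises IndexError are exactly the inputs Pre_ excludes)
def pvAGet (f : List (List Int)) (i k : Int) : Int :=
  PySem.List.pyGetD (PySem.List.pyGetD f i []) k 0

def pvASet (f : List (List Int)) (i k v : Int) : List (List Int) :=
  PySem.List.pySetD f i (PySem.List.pySetD (PySem.List.pyGetD f i []) k v)

-- body of A's inner loop:  for k in range(1, M+1): f[i][k] = …
def pvACell (A : List Int) (i : Int) (g : List (List Int)) (k : Int) : List (List Int) :=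
  let c := PySem.List.pyGetD A (i - 1) 0
  pvASet g i k (if k < c then pvAGet g (i - 1) k else max (pvAGet g (i - 1) k) (pvAGet g i (k - c)))

def pvAInner (A : List Int) (M : Int) (i : Int) (f : List (List Int)) : List (List Int) :=
  (PySem.List.pyRange 1 (M + 1) 1).foldl (pvACell A i) f

def knapsackExists (A : List Int) (M : Int) : Int :=
  let n : Int := (A.length : Int)
  -- f = [[0 for _ in range(M+1)] for _ in range(len(A)+1)]
  let f : List (List Int) := (PySem.List.pyRange 0 (n + 1) 1).map
    (fun _ => (PySem.List.pyRange 0 (M + 1) 1).map (fun _ => (0 : Int)))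
  -- for i in range(len(f)): f[i][0] = 1
  let f := (PySem.List.pyRange 0 (f.length : Int) 1).foldl (fun f i => pvASet f i 0 1) f
  -- for i in range(1, len(A)+1): for k in range(1, M+1): …
  let f := (PySem.List.pyRange 1 (n + 1) 1).foldl (fun f i => pvAInner A M i f) f
  pvAGet f n M

-- ===== PORT B =====
-- one iteration of  "for s in range(1, M+1): reach[s] = any([c <= s and reach[s-c] for c in A])"
def pvBStep (A : List Int) (r : List Bool) (s : Int) : List Bool :=
  PySem.List.pySetD r s
    (A.any (fun c => decide (c ≤ s) && PySem.List.pyGetD r (s - c) false))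

def knapsackExists_alt (A : List Int) (M : Int) : Int :=
  -- reach = [False] * (M + 1); reach[0] = True
  let reach : List Bool := (PySem.List.pyRange 0 (M + 1) 1).map (fun _ => false)
  let reach := PySem.List.pySetD reach 0 true
  let reach := (PySem.List.pyRange 1 (M + 1) 1).foldl (pvBStep A) reach
  if PySem.List.pyGetD reach M false then 1 else 0

-- ===== PRECONDITION & SPEC =====
-- Pre_ excludes exactly the inputs where A raises IndexError (B raises there too): M < 0
-- (the row index 0 does not exist), and M ≥ 1 with a negative coin (the column index
-- k - A[i-1] exceeds M).
def Pre_knapsackExists (A : List Int) (M : Int) : Prop :=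
  0 ≤ M ∧ (1 ≤ M → ∀ c ∈ A, 0 ≤ c)
instance (A : List Int) (M : Int) : Decidable (Pre_knapsackExists A M) := by
  unfold Pre_knapsackExists; infer_instance

def pvWitness_knapsackExists : List Int × Int := ([2, 3], 7)

def Spec_knapsackExists (A : List Int) (M : Int) (out : Int) : Prop := out = knapsackExists_alt A M
instance (A : List Int) (M : Int) (out : Int) : Decidable (Spec_knapsackExists A M out) := by
  unfold Spec_knapsackExists; infer_instance

-- ===== CLAIM (what is proved, stated in full; the proofs are below) =====
def Claim_equal_knapsackExists : Prop := ∀ (A : List Int) (M : Int), Dom_knapsackExists A M → Pre_knapsackExists A M → Spec_knapsackExists A M (knapsackExists A M)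

-- ===== LEMMAS AND PROOFS =====

-- "k is a sum of coins drawn (with repetition) from cs"
inductive pvReach (cs : List Int) : Int → Prop
  | zero : pvReach cs 0
  | step (k c : Int) : c ∈ cs → pvReach cs k → pvReach cs (k + c)

-- "k is reachable from P by adding j ≥ 0 copies of c" (A's per-row recurrence target)
def pvQ (P : Int → Prop) (c k : Int) : Prop := ∃ j : ℕ, (j : Int) * c ≤ k ∧ P (k - (j : Int) * c)

-- every row of the table has width W
def pvShape (W : Nat) (f : List (List Int)) : Prop := ∀ r ∈ f, r.length = W

lemma pvASet_length (f : List (List Int)) (i k v : Int) : (pvASet f i k v).length = f.length := by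
  simp [pvASet, PySem.List.length_pySetD]

lemma pvASet_shape {W : Nat} {f : List (List Int)} (h : pvShape W f) (i k v : Int)
    (hi0 : 0 ≤ i) (hil : i < (f.length : Int)) : pvShape W (pvASet f i k v) := by
  intro r hr
  unfold pvASet at hr
  rw [PySem.List.pySetD_of_nonneg _ _ hi0] at hr
  rcases List.mem_or_eq_of_mem_set hr with hmem | rfl
  · exact h r hmem
  · rw [PySem.List.length_pySetD, PySem.List.pyGetD_eq_getElem _ _ hi0 hil]
    exact h _ (List.getElem_mem _)

-- the 1-D read-after-write law (all indices in range)
lemma pvGetSet1 {α : Type} (l : List α) (d : α) (j : Int) (v : α) (j' : Int)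
    (hj : 0 ≤ j) (_hjl : j < (l.length : Int)) (hj' : 0 ≤ j') (hjl' : j' < (l.length : Int)) :
    PySem.List.pyGetD (PySem.List.pySetD l j v) j' d
      = if j' = j then v else PySem.List.pyGetD l j' d := by
  rw [PySem.List.pySetD_of_nonneg _ _ hj,
    PySem.List.pyGetD_eq_getElem _ _ hj' (by rw [List.length_set]; exact hjl'),
    List.getElem_set]
  by_cases h : j' = j
  · rw [if_pos h, if_pos (by omega)]
  · rw [if_neg h, if_neg (by omega), PySem.List.pyGetD_eq_getElem _ _ hj' hjl']

-- the 2-D read-after-write law (all indices in range)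
lemma pvAGet_pvASet {W : Nat} (f : List (List Int)) (hW : pvShape W f) (i k v i' k' : Int)
    (hi : 0 ≤ i) (hil : i < (f.length : Int)) (hk : 0 ≤ k) (_hkl : k < (W : Int))
    (hi' : 0 ≤ i') (hil' : i' < (f.length : Int)) (hk' : 0 ≤ k') (hkl' : k' < (W : Int)) :
    pvAGet (pvASet f i k v) i' k' = if i' = i ∧ k' = k then v else pvAGet f i' k' := by
  have hrowlen : (PySem.List.pyGetD f i []).length = W := by
    rw [PySem.List.pyGetD_eq_getElem _ _ hi hil]
    exact hW _ (List.getElem_mem _)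
  unfold pvASet pvAGet
  rw [PySem.List.pySetD_of_nonneg _ _ hi,
    PySem.List.pyGetD_eq_getElem _ _ hi' (by rw [List.length_set]; exact hil'),
    List.getElem_set]
  by_cases hii : i' = i
  · rw [if_pos (by omega)]
    rw [PySem.List.pySetD_of_nonneg _ _ hk,
      PySem.List.pyGetD_eq_getElem _ _ hk'
        (by rw [List.length_set, hrowlen]; exact_mod_cast hkl'),
      List.getElem_set]
    by_cases hkk : k' = k
    · rw [if_pos (by omega), if_pos ⟨hii, hkk⟩]
    · rw [if_neg (by omega), if_neg (by tauto), hii,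
        PySem.List.pyGetD_eq_getElem _ _ hk' (by rw [hrowlen]; exact_mod_cast hkl')]
  · rw [if_neg (by omega), if_neg (by tauto), PySem.List.pyGetD_eq_getElem _ _ hi' hil']

-- the initialisation loop marks exactly column 0 of every row in L
lemma pvMark_char (W : Nat) (L : List Int) (f0 : List (List Int)) (hW : pvShape W f0)
    (hmem : ∀ x ∈ L, 0 ≤ x ∧ x < (f0.length : Int)) (hW0 : 0 < W) :
    pvShape W (L.foldl (fun f i => pvASet f i 0 1) f0) ∧
    (L.foldl (fun f i => pvASet f i 0 1) f0).length = f0.length ∧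
    (∀ i' k', 0 ≤ i' → i' < (f0.length : Int) → 0 ≤ k' → k' < (W : Int) →
      pvAGet (L.foldl (fun f i => pvASet f i 0 1) f0) i' k'
        = if i' ∈ L ∧ k' = 0 then 1 else pvAGet f0 i' k') := by
  induction L generalizing f0 with
  | nil => exact ⟨hW, rfl, by intro i' k' _ _ _ _; simp⟩
  | cons x L ih =>
    obtain ⟨hx0, hxl⟩ := hmem x (List.mem_cons_self ..)
    have hW1 := pvASet_shape hW x 0 1 hx0 hxl
    have hlen1 := pvASet_length f0 x 0 1
    obtain ⟨hsh, hlen, hget⟩ := ih (pvASet f0 x 0 1) hW1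
      (by intro y hy; rw [hlen1]; exact hmem y (List.mem_cons_of_mem _ hy))
    rw [List.foldl_cons]
    refine ⟨hsh, by rw [hlen, hlen1], ?_⟩
    intro i' k' h1 h2 h3 h4
    rw [hget i' k' h1 (by rw [hlen1]; exact h2) h3 h4,
      pvAGet_pvASet f0 hW x 0 1 i' k' hx0 hxl (le_refl 0) (by exact_mod_cast hW0) h1 h2 h3 h4]
    by_cases hk : k' = 0 <;> by_cases hL : i' ∈ L <;> by_cases hx : i' = x <;>
      simp_all

-- the inner loop preserves shape and length and writes only cells (i, k) with k ∈ L
lemma pvACell_fold_meta (A : List Int) (i : Int) (W : Nat) (L : List Int)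
    (g0 : List (List Int)) (hW : pvShape W g0) (hi0 : 0 ≤ i) (hil : i < (g0.length : Int))
    (hmem : ∀ x ∈ L, 0 ≤ x ∧ x < (W : Int)) :
    pvShape W (L.foldl (pvACell A i) g0) ∧
    (L.foldl (pvACell A i) g0).length = g0.length ∧
    (∀ i' k', 0 ≤ i' → i' < (g0.length : Int) → 0 ≤ k' → k' < (W : Int) → (i' ≠ i ∨ k' ∉ L) →
      pvAGet (L.foldl (pvACell A i) g0) i' k' = pvAGet g0 i' k') := by
  induction L generalizing g0 with
  | nil => exact ⟨hW, rfl, by intro i' k' _ _ _ _ _; simp⟩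
  | cons x L ih =>
    obtain ⟨hx0, hxl⟩ := hmem x (List.mem_cons_self ..)
    have hW1 : pvShape W (pvACell A i g0 x) := pvASet_shape hW i x _ hi0 hil
    have hlen1 : (pvACell A i g0 x).length = g0.length := pvASet_length g0 i x _
    obtain ⟨hsh, hlen, hget⟩ := ih (pvACell A i g0 x) hW1 (by rw [hlen1]; exact hil)
      (fun y hy => hmem y (List.mem_cons_of_mem _ hy))
    rw [List.foldl_cons]
    refine ⟨hsh, by rw [hlen, hlen1], ?_⟩
    intro i' k' h1 h2 h3 h4 h5
    have h5' : i' ≠ i ∨ k' ∉ L :=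
      h5.imp id (fun hn hmem' => hn (List.mem_cons_of_mem x hmem'))
    rw [hget i' k' h1 (by rw [hlen1]; exact h2) h3 h4 h5']
    show pvAGet (pvASet g0 i x _) i' k' = pvAGet g0 i' k'
    rw [pvAGet_pvASet g0 hW i x _ i' k' hi0 hil hx0 hxl h1 h2 h3 h4]
    rcases h5 with h | h
    · rw [if_neg (by tauto)]
    · rw [if_neg (by intro hc; exact h (hc.2 ▸ List.mem_cons_self ..))]

lemma pvMax01 {a b : Int} (ha : a = 0 ∨ a = 1) (hb : b = 0 ∨ b = 1) :
    (max a b = 1 ↔ (a = 1 ∨ b = 1)) ∧ (max a b = 0 ∨ max a b = 1) := by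
  rcases ha with rfl | rfl <;> rcases hb with rfl | rfl <;> norm_num

-- pvQ recurrences
lemma pvQ_of_lt (P : Int → Prop) (c k : Int) (hk : 0 ≤ k) (h : k < c) : pvQ P c k ↔ P k := by
  constructor
  · rintro ⟨j, hj, hP⟩
    cases j with
    | zero => simpa using hP
    | succ j' =>
      exfalso
      have hc0 : (0 : Int) < c := by omega
      have h1 : ((j' + 1 : ℕ) : Int) * c ≤ k := hj
      push_cast at h1
      nlinarith
  · intro hP; exact ⟨0, by simpa using hk, by simpa using hP⟩

lemma pvQ_rec (P : Int → Prop) (c k : Int) (hc : 0 < c) (h : c ≤ k) :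
    pvQ P c k ↔ P k ∨ pvQ P c (k - c) := by
  constructor
  · rintro ⟨j, hj, hP⟩
    cases j with
    | zero => exact Or.inl (by simpa using hP)
    | succ j' =>
      refine Or.inr ⟨j', ?_, ?_⟩
      · push_cast at hj ⊢; linarith
      · have : k - ((j' : Int) + 1) * c = k - c - (j' : Int) * c := by ring
        push_cast at hP; rw [this] at hP; exact hP
  · rintro (hP | ⟨j, hj, hP⟩)
    · exact ⟨0, by simpa using (by linarith : (0 : Int) ≤ k), by simpa using hP⟩
    · refine ⟨j + 1, ?_, ?_⟩
      · push_cast; linarith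
      · have : k - ((j : Int) + 1) * c = k - c - (j : Int) * c := by ring
        push_cast; rw [this]; exact hP

-- A's inner loop, coin 1 ≤ c ≤ M: row i becomes the indicator of pvQ P c
lemma pvAInner_row_main (A : List Int) (M i c : Int) (W : Nat) (hWM : (W : Int) = M + 1)
    (P : Int → Prop)
    (hc : PySem.List.pyGetD A (i - 1) 0 = c) (hc1 : 1 ≤ c)
    (g0 : List (List Int)) (hW : pvShape W g0) (hi1 : 1 ≤ i) (hil : i < (g0.length : Int))
    (hP0 : P 0)
    (hprev : ∀ k, 0 ≤ k → k ≤ M → ((pvAGet g0 (i - 1) k = 1 ↔ P k) ∧ (pvAGet g0 (i - 1) k = 0 ∨ pvAGet g0 (i - 1) k = 1)))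
    (h00 : pvAGet g0 i 0 = 1) :
    ∀ m : Int, 0 ≤ m → m ≤ M → ∀ k, 1 ≤ k → k ≤ m →
      ((pvAGet ((PySem.List.pyRange 1 (m + 1) 1).foldl (pvACell A i) g0) i k = 1 ↔ pvQ P c k) ∧
       (pvAGet ((PySem.List.pyRange 1 (m + 1) 1).foldl (pvACell A i) g0) i k = 0 ∨
        pvAGet ((PySem.List.pyRange 1 (m + 1) 1).foldl (pvACell A i) g0) i k = 1)) := by
  intro m hm
  induction m, hm using Int.le_induction with
  | base => intro _ k hk1 hk0; omega
  | succ m hm ih =>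
    intro hM1 k hk1 hkm
    rw [PySem.List.pyRange_one_succ_right (by omega : (1 : Int) ≤ m + 1), List.foldl_append,
      List.foldl_cons, List.foldl_nil]
    set G := (PySem.List.pyRange 1 (m + 1) 1).foldl (pvACell A i) g0 with hG
    have hmemL : ∀ x ∈ PySem.List.pyRange 1 (m + 1) 1, 0 ≤ x ∧ x < (W : Int) := by
      intro x hx; rw [PySem.List.mem_pyRange_one] at hx; omega
    obtain ⟨hshG, hlenG, hunchG⟩ := pvACell_fold_meta A i W _ g0 hW (by omega) hil hmemL
    by_cases hk : k ≤ m
    · have hne : k ≠ m + 1 := by omega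
      have hcell : pvAGet (pvACell A i G (m + 1)) i k = pvAGet G i k := by
        show pvAGet (pvASet G i (m + 1) _) i k = pvAGet G i k
        rw [pvAGet_pvASet G hshG i (m + 1) _ i k (by omega) (by rw [hlenG]; exact hil)
          (by omega) (by omega) (by omega) (by rw [hlenG]; exact hil) (by omega) (by omega)]
        rw [if_neg (by tauto)]
      rw [hcell]
      exact ih (by omega) k hk1 hk
    · have hkeq : k = m + 1 := by omega
      subst hkeq
      have hGprev : pvAGet G (i - 1) (m + 1) = pvAGet g0 (i - 1) (m + 1) :=
        hunchG (i - 1) (m + 1) (by omega) (by omega) (by omega) (by omega) (Or.inl (by omega))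
      obtain ⟨hiff, h01⟩ := hprev (m + 1) (by omega) (by omega)
      have hcell : pvAGet (pvACell A i G (m + 1)) i (m + 1)
          = if m + 1 < c then pvAGet G (i - 1) (m + 1)
            else max (pvAGet G (i - 1) (m + 1)) (pvAGet G i (m + 1 - c)) := by
        show pvAGet (pvASet G i (m + 1) _) i (m + 1) = _
        rw [pvAGet_pvASet G hshG i (m + 1) _ i (m + 1) (by omega) (by rw [hlenG]; exact hil)
          (by omega) (by omega) (by omega) (by rw [hlenG]; exact hil) (by omega) (by omega)]
        rw [if_pos ⟨rfl, rfl⟩, hc]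
      rw [hcell]
      by_cases hlt : m + 1 < c
      · rw [if_pos hlt, hGprev, pvQ_of_lt P c (m + 1) (by omega) hlt]
        exact ⟨hiff, h01⟩
      · rw [if_neg hlt, hGprev, pvQ_rec P c (m + 1) (by omega) (by omega)]
        by_cases h0 : m + 1 - c = 0
        · have hGz : pvAGet G i (m + 1 - c) = 1 := by
            rw [h0, hunchG i 0 (by omega) (by omega) (by omega) (by omega)
              (Or.inr (by rw [PySem.List.mem_pyRange_one]; omega))]
            exact h00
          rw [hGz]
          have hQ : pvQ P c (m + 1 - c) := ⟨0, by simp [h0], by simpa [h0] using hP0⟩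
          obtain ⟨hmx, h01'⟩ := pvMax01 h01 (Or.inr rfl)
          exact ⟨⟨fun _ => Or.inr hQ, fun _ => hmx.mpr (Or.inr rfl)⟩, h01'⟩
        · obtain ⟨hiff2, h012⟩ := ih (by omega) (m + 1 - c) (by omega) (by omega)
          obtain ⟨hmx, h01'⟩ := pvMax01 h01 h012
          refine ⟨?_, h01'⟩
          rw [hmx]
          constructor
          · rintro (h | h)
            · exact Or.inl (hiff.mp h)
            · exact Or.inr (hiff2.mp h)
          · rintro (h | h)
            · exact Or.inl (hiff.mpr h)
            · exact Or.inr (hiff2.mpr h)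

-- A's inner loop, coin c = 0 or c > M: row i becomes a copy of row i-1
lemma pvAInner_row_copy (A : List Int) (M i c : Int) (W : Nat) (hWM : (W : Int) = M + 1)
    (P : Int → Prop)
    (hc : PySem.List.pyGetD A (i - 1) 0 = c) (hcase : c = 0 ∨ M < c)
    (g0 : List (List Int)) (hW : pvShape W g0) (hi1 : 1 ≤ i) (hil : i < (g0.length : Int))
    (hprev : ∀ k, 0 ≤ k → k ≤ M → ((pvAGet g0 (i - 1) k = 1 ↔ P k) ∧ (pvAGet g0 (i - 1) k = 0 ∨ pvAGet g0 (i - 1) k = 1)))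
    (hz : ∀ k, 1 ≤ k → k ≤ M → pvAGet g0 i k = 0) :
    ∀ m : Int, 0 ≤ m → m ≤ M → ∀ k, 1 ≤ k → k ≤ m →
      ((pvAGet ((PySem.List.pyRange 1 (m + 1) 1).foldl (pvACell A i) g0) i k = 1 ↔ P k) ∧
       (pvAGet ((PySem.List.pyRange 1 (m + 1) 1).foldl (pvACell A i) g0) i k = 0 ∨
        pvAGet ((PySem.List.pyRange 1 (m + 1) 1).foldl (pvACell A i) g0) i k = 1)) := by
  intro m hm
  induction m, hm using Int.le_induction with
  | base => intro _ k hk1 hk0; omega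
  | succ m hm ih =>
    intro hM1 k hk1 hkm
    rw [PySem.List.pyRange_one_succ_right (by omega : (1 : Int) ≤ m + 1), List.foldl_append,
      List.foldl_cons, List.foldl_nil]
    set G := (PySem.List.pyRange 1 (m + 1) 1).foldl (pvACell A i) g0 with hG
    have hmemL : ∀ x ∈ PySem.List.pyRange 1 (m + 1) 1, 0 ≤ x ∧ x < (W : Int) := by
      intro x hx; rw [PySem.List.mem_pyRange_one] at hx; omega
    obtain ⟨hshG, hlenG, hunchG⟩ := pvACell_fold_meta A i W _ g0 hW (by omega) hil hmemL
    by_cases hk : k ≤ m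
    · have hcell : pvAGet (pvACell A i G (m + 1)) i k = pvAGet G i k := by
        show pvAGet (pvASet G i (m + 1) _) i k = pvAGet G i k
        rw [pvAGet_pvASet G hshG i (m + 1) _ i k (by omega) (by rw [hlenG]; exact hil)
          (by omega) (by omega) (by omega) (by rw [hlenG]; exact hil) (by omega) (by omega)]
        rw [if_neg (by intro hcc; omega)]
      rw [hcell]
      exact ih (by omega) k hk1 hk
    · have hkeq : k = m + 1 := by omega
      subst hkeq
      have hGprev : pvAGet G (i - 1) (m + 1) = pvAGet g0 (i - 1) (m + 1) :=
        hunchG (i - 1) (m + 1) (by omega) (by omega) (by omega) (by omega) (Or.inl (by omega))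
      obtain ⟨hiff, h01⟩ := hprev (m + 1) (by omega) (by omega)
      have hcell : pvAGet (pvACell A i G (m + 1)) i (m + 1)
          = if m + 1 < c then pvAGet G (i - 1) (m + 1)
            else max (pvAGet G (i - 1) (m + 1)) (pvAGet G i (m + 1 - c)) := by
        show pvAGet (pvASet G i (m + 1) _) i (m + 1) = _
        rw [pvAGet_pvASet G hshG i (m + 1) _ i (m + 1) (by omega) (by rw [hlenG]; exact hil)
          (by omega) (by omega) (by omega) (by rw [hlenG]; exact hil) (by omega) (by omega)]
        rw [if_pos ⟨rfl, rfl⟩, hc]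
      rw [hcell]
      rcases hcase with rfl | hMc
      · rw [if_neg (by omega : ¬ m + 1 < 0)]
        have hGcur : pvAGet G i (m + 1 - 0) = 0 := by
          rw [show m + 1 - 0 = m + 1 by ring,
            hunchG i (m + 1) (by omega) (by omega) (by omega) (by omega)
              (Or.inr (by rw [PySem.List.mem_pyRange_one]; omega))]
          exact hz (m + 1) (by omega) (by omega)
        rw [hGcur, hGprev]
        rcases h01 with h0 | h1
        · rw [h0]
          refine ⟨⟨fun h => by simp at h, fun hp => absurd (hiff.mpr hp) (by omega)⟩, Or.inl (by simp)⟩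
        · rw [h1]
          exact ⟨⟨fun _ => hiff.mp h1, fun _ => by simp⟩, Or.inr (by simp)⟩
      · rw [if_pos (by omega : m + 1 < c), hGprev]
        exact ⟨hiff, h01⟩

-- basic facts about pvReach
lemma pvReach_nonneg {cs : List Int} (hcs : ∀ c ∈ cs, 0 ≤ c) {k : Int}
    (h : pvReach cs k) : 0 ≤ k := by
  induction h with
  | zero => exact le_refl 0
  | step k' c hc _ ih => have := hcs c hc; omega

lemma pvReach_mono {cs cs' : List Int} (hsub : ∀ c ∈ cs, c ∈ cs') {k : Int}
    (h : pvReach cs k) : pvReach cs' k := by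
  induction h with
  | zero => exact pvReach.zero
  | step k' c hc _ ih => exact pvReach.step k' c (hsub c hc) ih

lemma pvReach_add_copies {cs : List Int} {c : Int} (hc : c ∈ cs) {x : Int}
    (h : pvReach cs x) (j : ℕ) : pvReach cs (x + (j : Int) * c) := by
  induction j with
  | zero => simpa using h
  | succ j ih =>
    have := pvReach.step _ c hc ih
    have heq : x + (j : Int) * c + c = x + ((j + 1 : ℕ) : Int) * c := by push_cast; ring
    rwa [heq] at this

-- appending a usable coin is exactly one pvQ layer
lemma pvQ_append (pre : List Int) (c : Int) (hpre : ∀ x ∈ pre, 0 ≤ x) (_hc0 : 0 ≤ c) (k : Int) :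
    pvQ (pvReach pre) c k ↔ pvReach (pre ++ [c]) k := by
  constructor
  · rintro ⟨j, hj, hP⟩
    have h1 : pvReach (pre ++ [c]) (k - (j : Int) * c) :=
      pvReach_mono (fun x hx => List.mem_append_left _ hx) hP
    have h2 := pvReach_add_copies (List.mem_append_right pre (List.mem_singleton.mpr rfl)) h1 j
    rwa [sub_add_cancel] at h2
  · intro h
    induction h with
    | zero => exact ⟨0, by simp, by simpa using pvReach.zero⟩
    | step k' c' hc' _ ih =>
      rcases List.mem_append.mp hc' with hin | hone
      · obtain ⟨j, hj, hp⟩ := ih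
        have hc'0 : 0 ≤ c' := hpre c' hin
        refine ⟨j, by omega, ?_⟩
        have heq : k' + c' - (j : Int) * c = (k' - (j : Int) * c) + c' := by ring
        rw [heq]
        exact pvReach.step _ c' hin hp
      · have hce : c' = c := List.mem_singleton.mp hone
        obtain ⟨j, hj, hp⟩ := ih
        refine ⟨j + 1, ?_, ?_⟩
        · rw [hce]; push_cast; nlinarith [hj]
        · have heq : k' + c' - ((j + 1 : ℕ) : Int) * c = k' - (j : Int) * c := by
            rw [hce]; push_cast; ring
          rwa [heq]

-- appending the coin 0 changes nothing
lemma pvReach_append_zero (pre : List Int) (k : Int) :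
    pvReach (pre ++ [0]) k ↔ pvReach pre k := by
  constructor
  · intro h
    induction h with
    | zero => exact pvReach.zero
    | step k' c' hc' _ ih =>
      rcases List.mem_append.mp hc' with hin | hone
      · exact pvReach.step _ c' hin ih
      · obtain rfl : c' = 0 := List.mem_singleton.mp hone
        simpa using ih
  · exact pvReach_mono (fun x hx => List.mem_append_left _ hx)

-- appending a coin larger than the target changes nothing below it
lemma pvReach_append_big (pre : List Int) (c : Int) (hpre : ∀ x ∈ pre, 0 ≤ x) (hc0 : 0 ≤ c)
    (k : Int) (hk : k < c) : pvReach (pre ++ [c]) k ↔ pvReach pre k := by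
  have hall : ∀ x ∈ pre ++ [c], 0 ≤ x := by
    intro x hx
    rcases List.mem_append.mp hx with hx | hx
    · exact hpre x hx
    · obtain rfl := List.mem_singleton.mp hx; exact hc0
  have aux : ∀ k', pvReach (pre ++ [c]) k' → k' < c → pvReach pre k' := by
    intro k' h
    induction h with
    | zero => intro _; exact pvReach.zero
    | step k'' c' hc' hrec ih =>
      intro hlt
      have hk0 : 0 ≤ k'' := pvReach_nonneg hall hrec
      rcases List.mem_append.mp hc' with hin | hone
      · have hc'0 : 0 ≤ c' := hpre c' hin
        exact pvReach.step _ c' hin (ih (by omega))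
      · obtain rfl : c' = c := List.mem_singleton.mp hone
        omega
  exact ⟨fun h => aux k h hk, pvReach_mono (fun x hx => List.mem_append_left _ hx)⟩

-- B's recurrence: a positive sum is reached exactly through some positive coin ≤ it
lemma pvReach_pos_step (cs : List Int) (hcs : ∀ c ∈ cs, 0 ≤ c) (s : Int) (hs : 1 ≤ s) :
    pvReach cs s ↔ ∃ c ∈ cs, 1 ≤ c ∧ c ≤ s ∧ pvReach cs (s - c) := by
  constructor
  · have aux : ∀ s', pvReach cs s' → 1 ≤ s' →
        ∃ c ∈ cs, 1 ≤ c ∧ c ≤ s' ∧ pvReach cs (s' - c) := by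
      intro s' h
      induction h with
      | zero => intro h1; omega
      | step k c hc hrec ih =>
        intro _
        have hk0 : 0 ≤ k := pvReach_nonneg hcs hrec
        have hc0 : 0 ≤ c := hcs c hc
        by_cases hc1 : 1 ≤ c
        · exact ⟨c, hc, hc1, by omega, by simpa using hrec⟩
        · have hcz : c = 0 := by omega
          obtain ⟨c', hc', h1, h2, h3⟩ := ih (by omega)
          exact ⟨c', hc', h1, by omega, by rwa [show k + c - c' = k - c' by omega]⟩
    exact fun h => aux s h hs
  · rintro ⟨c, hc, _, _, h⟩
    have := pvReach.step _ c hc h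
    rwa [sub_add_cancel] at this

-- the outer loop of A: after t coins, row t is the indicator of pvReach (A.take t)
lemma pvOuter (A : List Int) (M : Int) (hM : 1 ≤ M) (hcoins : ∀ c ∈ A, 0 ≤ c) :
    ∀ t : Nat, t ≤ A.length →
      (pvShape (M + 1).toNat ((PySem.List.pyRange 1 ((t : Int) + 1) 1).foldl (fun f i => pvAInner A M i f)
          ((PySem.List.pyRange 0 ((A.length : Int) + 1) 1).foldl (fun f i => pvASet f i 0 1)
            ((PySem.List.pyRange 0 ((A.length : Int) + 1) 1).map
              (fun _ => (PySem.List.pyRange 0 (M + 1) 1).map (fun _ => (0 : Int)))))) ∧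
       (((PySem.List.pyRange 1 ((t : Int) + 1) 1).foldl (fun f i => pvAInner A M i f)
          ((PySem.List.pyRange 0 ((A.length : Int) + 1) 1).foldl (fun f i => pvASet f i 0 1)
            ((PySem.List.pyRange 0 ((A.length : Int) + 1) 1).map
              (fun _ => (PySem.List.pyRange 0 (M + 1) 1).map (fun _ => (0 : Int)))))).length : Int)
          = (A.length : Int) + 1 ∧
       (∀ i' k', (t : Int) < i' → i' ≤ (A.length : Int) → 0 ≤ k' → k' ≤ M →
          pvAGet ((PySem.List.pyRange 1 ((t : Int) + 1) 1).foldl (fun f i => pvAInner A M i f)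
            ((PySem.List.pyRange 0 ((A.length : Int) + 1) 1).foldl (fun f i => pvASet f i 0 1)
              ((PySem.List.pyRange 0 ((A.length : Int) + 1) 1).map
                (fun _ => (PySem.List.pyRange 0 (M + 1) 1).map (fun _ => (0 : Int)))))) i' k'
            = if k' = 0 then 1 else 0) ∧
       (∀ k, 0 ≤ k → k ≤ M →
          ((pvAGet ((PySem.List.pyRange 1 ((t : Int) + 1) 1).foldl (fun f i => pvAInner A M i f)
            ((PySem.List.pyRange 0 ((A.length : Int) + 1) 1).foldl (fun f i => pvASet f i 0 1)
              ((PySem.List.pyRange 0 ((A.length : Int) + 1) 1).map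
                (fun _ => (PySem.List.pyRange 0 (M + 1) 1).map (fun _ => (0 : Int)))))) (t : Int) k = 1
            ↔ pvReach (A.take t) k) ∧
           (pvAGet ((PySem.List.pyRange 1 ((t : Int) + 1) 1).foldl (fun f i => pvAInner A M i f)
            ((PySem.List.pyRange 0 ((A.length : Int) + 1) 1).foldl (fun f i => pvASet f i 0 1)
              ((PySem.List.pyRange 0 ((A.length : Int) + 1) 1).map
                (fun _ => (PySem.List.pyRange 0 (M + 1) 1).map (fun _ => (0 : Int)))))) (t : Int) k = 0 ∨
            pvAGet ((PySem.List.pyRange 1 ((t : Int) + 1) 1).foldl (fun f i => pvAInner A M i f)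
            ((PySem.List.pyRange 0 ((A.length : Int) + 1) 1).foldl (fun f i => pvASet f i 0 1)
              ((PySem.List.pyRange 0 ((A.length : Int) + 1) 1).map
                (fun _ => (PySem.List.pyRange 0 (M + 1) 1).map (fun _ => (0 : Int)))))) (t : Int) k = 1)))) := by
  set W : Nat := (M + 1).toNat with hWdef
  have hWM : (W : Int) = M + 1 := by omega
  set init : List (List Int) := (PySem.List.pyRange 0 ((A.length : Int) + 1) 1).map
    (fun _ => (PySem.List.pyRange 0 (M + 1) 1).map (fun _ => (0 : Int))) with hinit
  have hinitlen : (init.length : Int) = (A.length : Int) + 1 := by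
    rw [hinit, List.length_map, PySem.List.length_pyRange_one]; omega
  have hinitsh : pvShape W init := by
    intro r hr
    rw [hinit] at hr
    obtain ⟨x, _, rfl⟩ := List.mem_map.mp hr
    rw [List.length_map, PySem.List.length_pyRange_one]
    omega
  have hinitget : ∀ i' k', 0 ≤ i' → i' < (init.length : Int) → 0 ≤ k' → k' < (W : Int) →
      pvAGet init i' k' = 0 := by
    intro i' k' h1 h2 h3 h4
    rw [hinitlen] at h2
    unfold pvAGet
    rw [hinit, PySem.List.pyGetD_map_pyRange_of_nonneg _ ((A.length : Int) + 1) i' [] h1 h2,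
      PySem.List.pyGetD_map_pyRange_of_nonneg _ (M + 1) k' 0 h3 (by omega)]
  obtain ⟨hmsh, hmlen, hmget⟩ := pvMark_char W (PySem.List.pyRange 0 ((A.length : Int) + 1) 1)
    init hinitsh
    (by intro x hx; rw [PySem.List.mem_pyRange_one] at hx; omega) (by omega)
  set F1 := (PySem.List.pyRange 0 ((A.length : Int) + 1) 1).foldl (fun f i => pvASet f i 0 1) init
    with hF1
  have hF1len : ((F1.length : Int)) = (A.length : Int) + 1 := by rw [hmlen]; exact hinitlen
  have hF1c : ∀ i' k', 0 ≤ i' → i' ≤ (A.length : Int) → 0 ≤ k' → k' ≤ M →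
      pvAGet F1 i' k' = if k' = 0 then 1 else 0 := by
    intro i' k' h0 h1 h2 h3
    rw [hmget i' k' h0 (by omega) h2 (by omega), hinitget i' k' h0 (by omega) h2 (by omega)]
    by_cases hk : k' = 0
    · rw [if_pos ⟨by rw [PySem.List.mem_pyRange_one]; omega, hk⟩, if_pos hk]
    · rw [if_neg (by intro h; exact hk h.2), if_neg hk]
  intro t
  induction t with
  | zero =>
    intro _
    rw [show ((0 : ℕ) : Int) + 1 = 1 by norm_num, PySem.List.pyRange_one_eq_nil (le_refl 1),
      List.foldl_nil]
    refine ⟨hmsh, by rw [hmlen]; exact hinitlen, ?_, ?_⟩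
    · intro i' k' hti hin h2 h3
      exact hF1c i' k' (by omega) hin h2 h3
    · intro k hk0 hkM
      simp only [Nat.cast_zero, List.take_zero]
      rw [hF1c 0 k (le_refl 0) (by positivity) hk0 hkM]
      by_cases hk : k = 0
      · subst hk
        exact ⟨⟨fun _ => pvReach.zero, fun _ => by rw [if_pos rfl]⟩, by rw [if_pos rfl]; exact Or.inr rfl⟩
      · rw [if_neg hk]
        refine ⟨⟨fun h => by omega, fun hp => ?_⟩, Or.inl rfl⟩
        exfalso
        have aux : ∀ k', pvReach ([] : List Int) k' → k' = 0 := by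
          intro k' h
          induction h with
          | zero => rfl
          | step k'' c hc _ _ => exact absurd hc (List.not_mem_nil)
        exact hk (aux k hp)
  | succ t iht =>
    intro ht1
    have ht : t < A.length := by omega
    obtain ⟨hsh, hlen, ha, hb⟩ := iht (by omega)
    have hsplitA : PySem.List.pyRange 1 (((t + 1 : ℕ) : Int) + 1) 1
        = PySem.List.pyRange 1 ((t : Int) + 1) 1 ++ [(t : Int) + 1] := by
      push_cast
      exact PySem.List.pyRange_one_succ_right (by omega)
    have hsplitB : A.take (t + 1) = A.take t ++ [A[t]] := by
      rw [List.take_add_one, List.getElem?_eq_getElem ht]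
      rfl
    rw [hsplitA, List.foldl_append, List.foldl_cons, List.foldl_nil]
    set F := (PySem.List.pyRange 1 ((t : Int) + 1) 1).foldl (fun f i => pvAInner A M i f) F1 with hF
    have hcoin : PySem.List.pyGetD A (((t : Int) + 1) - 1) 0 = A[t] := by
      rw [show ((t : Int) + 1) - 1 = (t : Int) by ring, PySem.List.pyGetD_natCast]
      exact List.getD_eq_getElem A 0 ht
    have hc0 : 0 ≤ A[t] := hcoins _ (A.getElem_mem ht)
    have hpretake : ∀ x ∈ A.take t, 0 ≤ x := fun x hx => hcoins x (List.mem_of_mem_take hx)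
    have hprev : ∀ k, 0 ≤ k → k ≤ M →
        ((pvAGet F (((t : Int) + 1) - 1) k = 1 ↔ pvReach (A.take t) k) ∧
         (pvAGet F (((t : Int) + 1) - 1) k = 0 ∨ pvAGet F (((t : Int) + 1) - 1) k = 1)) := by
      intro k h0 h1
      rw [show ((t : Int) + 1) - 1 = (t : Int) by ring]
      exact hb k h0 h1
    have h00 : pvAGet F ((t : Int) + 1) 0 = 1 := by
      rw [ha ((t : Int) + 1) 0 (by omega) (by omega) (le_refl 0) (by omega)]; simp
    have hz : ∀ k, 1 ≤ k → k ≤ M → pvAGet F ((t : Int) + 1) k = 0 := by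
      intro k hk hk2
      rw [ha ((t : Int) + 1) k (by omega) (by omega) (by omega) hk2, if_neg (by omega)]
    have hmemM : ∀ x ∈ PySem.List.pyRange 1 (M + 1) 1, 0 ≤ x ∧ x < ((W : Nat) : Int) := by
      intro x hx; rw [PySem.List.mem_pyRange_one] at hx; omega
    obtain ⟨hsh', hlen', hunch⟩ := pvACell_fold_meta A ((t : Int) + 1) W
      (PySem.List.pyRange 1 (M + 1) 1) F hsh (by omega) (by omega) hmemM
    have hsh'' : pvShape W (pvAInner A M ((t : Int) + 1) F) := hsh'
    have hlen'' : ((pvAInner A M ((t : Int) + 1) F).length : Int) = (A.length : Int) + 1 := by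
      show ((((PySem.List.pyRange 1 (M + 1) 1).foldl (pvACell A ((t : Int) + 1)) F).length : Int)) = _
      rw [hlen']; exact hlen
    have hAunch : ∀ i' k', i' ≠ (t : Int) + 1 → 0 ≤ i' → i' ≤ (A.length : Int) → 0 ≤ k' → k' ≤ M →
        pvAGet (pvAInner A M ((t : Int) + 1) F) i' k' = pvAGet F i' k' := by
      intro i' k' hne h1 h2 h3 h4
      exact hunch i' k' h1 (by omega) h3 (by omega) (Or.inl hne)
    have hA0 : pvAGet (pvAInner A M ((t : Int) + 1) F) ((t : Int) + 1) 0
        = pvAGet F ((t : Int) + 1) 0 := by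
      exact hunch ((t : Int) + 1) 0 (by omega) (by omega) (le_refl 0) (by omega)
        (Or.inr (by rw [PySem.List.mem_pyRange_one]; omega))
    by_cases hcm : 1 ≤ A[t] ∧ A[t] ≤ M
    · -- usable coin: one pvQ layer = appending the coin
      have hrow := pvAInner_row_main A M ((t : Int) + 1) A[t] W hWM
        (pvReach (A.take t))
        hcoin hcm.1 F hsh (by omega) (by omega) pvReach.zero hprev h00 M (by omega) (le_refl M)
      refine ⟨hsh'', by exact_mod_cast hlen'', ?_, ?_⟩
      · intro i' k' hti hin h2 h3
        push_cast at hti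
        rw [hAunch i' k' (by omega) (by omega) hin h2 h3]
        exact ha i' k' (by omega) hin h2 h3
      · intro k h0 h1
        push_cast
        rw [hsplitB]
        by_cases hk1 : 1 ≤ k
        · obtain ⟨hiff, h01⟩ := hrow k hk1 h1
          simp only [pvAInner] at hiff h01 ⊢
          exact ⟨hiff.trans (pvQ_append (A.take t) A[t] hpretake hc0 k), h01⟩
        · have hk0 : k = 0 := by omega
          subst hk0
          rw [hA0, h00]
          exact ⟨⟨fun _ => pvReach.zero, fun _ => rfl⟩, Or.inr rfl⟩
    · -- skipped coin: A[t] = 0 or A[t] > M, row copies and pvReach is unchanged below M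
      have hcase : A[t] = 0 ∨ M < A[t] := by omega
      have hrow := pvAInner_row_copy A M ((t : Int) + 1) A[t] W hWM
        (pvReach (A.take t))
        hcoin hcase F hsh (by omega) (by omega) hprev hz M (by omega) (le_refl M)
      refine ⟨hsh'', by exact_mod_cast hlen'', ?_, ?_⟩
      · intro i' k' hti hin h2 h3
        push_cast at hti
        rw [hAunch i' k' (by omega) (by omega) hin h2 h3]
        exact ha i' k' (by omega) hin h2 h3
      · intro k h0 h1
        push_cast
        rw [hsplitB]
        have hsame : pvReach (A.take t ++ [A[t]]) k ↔ pvReach (A.take t) k := by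
          rcases hcase with hzc | hMc
          · rw [hzc]; exact pvReach_append_zero (A.take t) k
          · exact pvReach_append_big (A.take t) A[t] hpretake hc0 k (by omega)
        by_cases hk1 : 1 ≤ k
        · obtain ⟨hiff, h01⟩ := hrow k hk1 h1
          simp only [pvAInner] at hiff h01 ⊢
          exact ⟨hiff.trans hsame.symm, h01⟩
        · have hk0 : k = 0 := by omega
          subst hk0
          rw [hA0, h00]
          exact ⟨⟨fun _ => pvReach.zero, fun _ => rfl⟩, Or.inr rfl⟩

-- B's loop invariant: after processing sums 1..m, bit k is "k = 0 or k ≤ m and reachable"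
lemma pvBFold (A : List Int) (M : Int) (hM : 1 ≤ M) (hcoins : ∀ c ∈ A, 0 ≤ c) :
    ∀ m : Int, 0 ≤ m → m ≤ M →
      (((PySem.List.pyRange 1 (m + 1) 1).foldl (pvBStep A)
          (PySem.List.pySetD ((PySem.List.pyRange 0 (M + 1) 1).map (fun _ => false)) 0 true)).length
        = (M + 1).toNat ∧
       ∀ k, 0 ≤ k → k ≤ M →
        (PySem.List.pyGetD ((PySem.List.pyRange 1 (m + 1) 1).foldl (pvBStep A)
            (PySem.List.pySetD ((PySem.List.pyRange 0 (M + 1) 1).map (fun _ => false)) 0 true)) k false = true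
          ↔ (k = 0 ∨ (k ≤ m ∧ pvReach A k)))) := by
  have hlen0 : ((PySem.List.pyRange 0 (M + 1) 1).map (fun _ => false)).length = (M + 1).toNat := by
    rw [List.length_map, PySem.List.length_pyRange_one]; omega
  have hlen0' : (PySem.List.pySetD ((PySem.List.pyRange 0 (M + 1) 1).map (fun _ => false)) 0 true).length
      = (M + 1).toNat := by
    rw [PySem.List.length_pySetD, hlen0]
  intro m hm
  induction m, hm using Int.le_induction with
  | base =>
    intro _
    rw [show (0 : Int) + 1 = 1 by norm_num, PySem.List.pyRange_one_eq_nil (le_refl 1),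
      List.foldl_nil]
    refine ⟨hlen0', ?_⟩
    intro k hk0 hkM
    rw [pvGetSet1 _ false 0 true k (le_refl 0) (by rw [hlen0]; omega) hk0 (by rw [hlen0]; omega)]
    by_cases hk : k = 0
    · simp [hk]
    · rw [if_neg hk,
        PySem.List.pyGetD_map_pyRange_of_nonneg _ (M + 1) k false hk0 (by omega)]
      simp only [Bool.false_eq_true, false_iff]
      rintro (h | ⟨h1, _⟩) <;> omega
  | succ m hm ih =>
    intro hM1
    obtain ⟨hlen, hinv⟩ := ih (by omega)
    rw [PySem.List.pyRange_one_succ_right (by omega : (1 : Int) ≤ m + 1), List.foldl_append,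
      List.foldl_cons, List.foldl_nil]
    set r := (PySem.List.pyRange 1 (m + 1) 1).foldl (pvBStep A)
      (PySem.List.pySetD ((PySem.List.pyRange 0 (M + 1) 1).map (fun _ => false)) 0 true) with hr
    have hb : (A.any (fun c => decide (c ≤ m + 1) && PySem.List.pyGetD r (m + 1 - c) false)) = true
        ↔ pvReach A (m + 1) := by
      rw [List.any_eq_true]
      constructor
      · rintro ⟨c, hc, hcond⟩
        rw [Bool.and_eq_true, decide_eq_true_eq] at hcond
        obtain ⟨hcs, hget⟩ := hcond
        have hc0 : 0 ≤ c := hcoins c hc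
        have := (hinv (m + 1 - c) (by omega) (by omega)).mp hget
        rcases this with h0 | ⟨hle, hrch⟩
        · -- c = m + 1: one step from 0
          have hceq : c = m + 1 := by omega
          have := pvReach.step 0 c hc pvReach.zero
          rwa [zero_add, hceq] at this
        · -- 1 ≤ c: one step from m + 1 - c
          have := pvReach.step _ c hc hrch
          rwa [sub_add_cancel] at this
      · intro h
        obtain ⟨c, hc, hc1, hcs, hrch⟩ :=
          (pvReach_pos_step A hcoins (m + 1) (by omega)).mp h
        refine ⟨c, hc, ?_⟩
        rw [Bool.and_eq_true, decide_eq_true_eq]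
        refine ⟨hcs, (hinv (m + 1 - c) (by omega) (by omega)).mpr ?_⟩
        by_cases hz : m + 1 - c = 0
        · exact Or.inl hz
        · exact Or.inr ⟨by omega, hrch⟩
    constructor
    · show (PySem.List.pySetD r _ _).length = (M + 1).toNat
      rw [PySem.List.length_pySetD]; exact hlen
    · intro k hk0 hkM
      show PySem.List.pyGetD (PySem.List.pySetD r (m + 1) _) k false = true ↔ _
      rw [pvGetSet1 r false (m + 1) _ k (by omega) (by rw [hlen]; omega) hk0 (by rw [hlen]; omega)]
      by_cases hk : k = m + 1
      · rw [if_pos hk, hb, hk]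
        constructor
        · intro h; exact Or.inr ⟨le_refl _, h⟩
        · rintro (h | ⟨_, h⟩)
          · omega
          · exact h
      · rw [if_neg hk, hinv k hk0 hkM]
        constructor
        · rintro (h | ⟨h1, h2⟩)
          · exact Or.inl h
          · exact Or.inr ⟨by omega, h2⟩
        · rintro (h | ⟨h1, h2⟩)
          · exact Or.inl h
          · exact Or.inr ⟨by omega, h2⟩

lemma pvA_id_of_M0 (A : List Int) (L : List Int) (f : List (List Int)) :
    L.foldl (fun f i => pvAInner A 0 i f) f = f := by
  induction L generalizing f with
  | nil => rfl
  | cons x L ih =>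
    rw [List.foldl_cons]
    have : pvAInner A 0 x f = f := by
      rw [pvAInner, show (0 : Int) + 1 = 1 by norm_num,
        PySem.List.pyRange_one_eq_nil (le_refl 1), List.foldl_nil]
    rw [this, ih]

-- ===== VERDICT (by name: the statement is the Claim_ definition above) =====
theorem knapsackExists_spec : Claim_equal_knapsackExists := by
  intro A M hdom hpre
  obtain ⟨hM0, hco⟩ := hpre
  unfold Spec_knapsackExists knapsackExists knapsackExists_alt
  dsimp only
  have hlenf : (((PySem.List.pyRange 0 ((A.length : Int) + 1) 1).map
      (fun _ => (PySem.List.pyRange 0 (M + 1) 1).map (fun _ => (0 : Int)))).length : Int)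
      = (A.length : Int) + 1 := by
    rw [List.length_map, PySem.List.length_pyRange_one]; omega
  rw [hlenf]
  by_cases hM : 1 ≤ M
  · obtain ⟨_, _, _, hb⟩ := pvOuter A M hM (hco hM) A.length (le_refl _)
    obtain ⟨hiff, h01⟩ := hb M (by omega) (le_refl M)
    rw [List.take_length] at hiff
    obtain ⟨_, hinv⟩ := pvBFold A M hM (hco hM) M (by omega) (le_refl M)
    have hbit := hinv M (by omega) (le_refl M)
    by_cases hr : PySem.List.pyGetD ((PySem.List.pyRange 1 (M + 1) 1).foldl (pvBStep A)
        (PySem.List.pySetD ((PySem.List.pyRange 0 (M + 1) 1).map (fun _ => false)) 0 true)) M false = true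
    · rw [if_pos hr]
      rcases hbit.mp hr with h0 | ⟨_, h⟩
      · exact hiff.mpr (h0 ▸ pvReach.zero)
      · exact hiff.mpr h
    · rw [if_neg hr]
      rcases h01 with h | h
      · exact h
      · exact absurd (hbit.mpr (Or.inr ⟨le_refl M, hiff.mp h⟩)) hr
  · have hMz : M = 0 := by omega
    subst hMz
    rw [pvA_id_of_M0]
    rw [show (0 : Int) + 1 = 1 by norm_num, PySem.List.pyRange_one_eq_nil (le_refl 1),
      List.foldl_nil]
    obtain ⟨hmsh, hmlen, hmget⟩ := pvMark_char 1 (PySem.List.pyRange 0 ((A.length : Int) + 1) 1)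
      ((PySem.List.pyRange 0 ((A.length : Int) + 1) 1).map
        (fun _ => (PySem.List.pyRange 0 1 1).map (fun _ => (0 : Int))))
      (by
        intro r hr
        obtain ⟨x, _, rfl⟩ := List.mem_map.mp hr
        rw [List.length_map, PySem.List.length_pyRange_one]
        omega)
      (by
        intro x hx
        rw [PySem.List.mem_pyRange_one] at hx
        rw [List.length_map, PySem.List.length_pyRange_one]
        omega)
      (by omega)
    rw [hmget (A.length : Int) 0 (by positivity)
      (by rw [List.length_map, PySem.List.length_pyRange_one]; omega) (le_refl 0) (by omega)]
    rw [if_pos ⟨by rw [PySem.List.mem_pyRange_one]; omega, rfl⟩]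
    rw [pvGetSet1 _ false 0 true 0 (le_refl 0)
      (by rw [List.length_map, PySem.List.length_pyRange_one]; omega) (le_refl 0)
      (by rw [List.length_map, PySem.List.length_pyRange_one]; omega)]
    simp
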